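-- pv_equiv track=rewrite | github.com/fury93/leetcode_python3_solutions | 3614-find-the-number-of-k-even-arrays/find-the-number-of-k-even-arrays.py | countOfArrays
-- ===== SOURCE A (Python) =====
-- from math import comb
--
-- def countOfArrays(n: int, m: int, k: int) -> int:
--     o, e, mod = (m+1)//2, m//2, 10**9+7
--
--     res = 0
--
--     # corner case: when there's no even sections (x == 0), all numbers are odd
--     if k == 0:
--         res += pow(o, n, mod)
--
--     for x in range(1, (n+1-k)//2+1):
--         res += comb(x+k-1, x-1) * comb(n-x-k+1, x) \
--                 * pow(e, x+k, mod) * pow(o, n-x-k, mod) % mod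
--
--     return res % mod
-- ===== SOURCE B (Python) =====
-- def countOfArrays(n: int, m: int, k: int) -> int:
--     # DP over the n positions instead of the closed-form combinatorial sum.
--     # State j = number of adjacent even-even pairs so far;
--     # a[j] = ways whose last element is odd (or the array is empty),
--     # b[j] = ways whose last element is even.  All arithmetic mod 10**9+7.
--     mod = 10 ** 9 + 7
--     o, e = (m + 1) // 2, m // 2
--     if k < 0 or k > n:
--         return 0
--     a = [0] * (k + 1)
--     a[0] = 1
--     b = [0] * (k + 1)
--     for _ in range(n):
--         na = [o * (a[j] + b[j]) % mod for j in range(k + 1)]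
--         nb = [(e * a[j] + (e * b[j - 1] if j else 0)) % mod for j in range(k + 1)]
--         a, b = na, nb
--     return (a[k] + b[k]) % mod
-- ===== Notes on version B (the rewrite author's own statement) =====
-- stated objective: alternative
-- what changed: Replaced the closed-form combinatorial sum (binomial coefficients over the number of even blocks, with math.comb and modular pow) by a dynamic program over the n positions that tracks, per number of completed even-even adjacencies j and a last-element-parity flag, the number of arrays mod 10**9+7; it trades A's short big-integer sum for O(n*k) small modular operations.
-- outside the precondition, e.g. on countOfArrays(-1, 3, 0): A returns 500000004, B returns 0
import Mathlib
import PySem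

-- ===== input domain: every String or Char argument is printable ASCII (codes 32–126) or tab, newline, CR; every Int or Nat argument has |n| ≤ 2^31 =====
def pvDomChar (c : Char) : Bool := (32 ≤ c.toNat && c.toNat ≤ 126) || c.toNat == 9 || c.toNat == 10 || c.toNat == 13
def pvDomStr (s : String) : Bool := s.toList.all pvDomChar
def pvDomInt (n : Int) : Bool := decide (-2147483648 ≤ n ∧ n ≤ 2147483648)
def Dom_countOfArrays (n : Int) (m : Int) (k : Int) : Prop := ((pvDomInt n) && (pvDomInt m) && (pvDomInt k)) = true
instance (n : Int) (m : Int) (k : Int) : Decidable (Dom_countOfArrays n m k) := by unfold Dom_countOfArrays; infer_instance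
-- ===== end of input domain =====

-- B replaces A's closed-form combinatorial sum by a dynamic program over the n positions
-- (objective: alternative algorithm of similar cost; equal return value on all of Pre_).

-- ===== PORT A =====
-- math.comb(a, b) is ported as Nat.choose via .toNat (exact for a, b ≥ 0; Python raises
-- ValueError on negative arguments, and Pre_ excludes every input reaching that).
-- pow(b, e, mod) is PySem.Int.powMod with a Nat exponent (exact for e ≥ 0; Python raises /
-- computes a modular inverse for e < 0, and Pre_ excludes every input reaching that).
def countOfArrays (n : Int) (m : Int) (k : Int) : Int :=
  let o : Int := PySem.Int.floordiv (m + 1) 2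
  let e : Int := PySem.Int.floordiv m 2
  let md : Int := 10 ^ 9 + 7
  let res : Int := 0
  let res : Int := if k = 0 then res + PySem.Int.powMod o n.toNat md else res
  let res : Int :=
    (PySem.List.pyRange 1 (PySem.Int.floordiv (n + 1 - k) 2 + 1) 1).foldl
      (fun res x =>
        res + PySem.Int.mod
          (((x + k - 1).toNat.choose (x - 1).toNat : Int)
            * ((n - x - k + 1).toNat.choose x.toNat : Int)
            * PySem.Int.powMod e (x + k).toNat md
            * PySem.Int.powMod o (n - x - k).toNat md) md) res
  PySem.Int.mod res md

-- ===== PORT B =====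
def countOfArrays_alt (n : Int) (m : Int) (k : Int) : Int :=
  let md : Int := 10 ^ 9 + 7
  let o : Int := PySem.Int.floordiv (m + 1) 2
  let e : Int := PySem.Int.floordiv m 2
  if k < 0 ∨ n < k then 0
  else
    let a : List Int := (List.replicate (k.toNat + 1) 0).set 0 1
    let b : List Int := List.replicate (k.toNat + 1) 0
    let ab : List Int × List Int :=
      (List.range n.toNat).foldl
        (fun ab _ =>
          let a := ab.1
          let b := ab.2
          let na := (List.range (k.toNat + 1)).map
            (fun j => PySem.Int.mod (o * (a.getD j 0 + b.getD j 0)) md)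
          let nb := (List.range (k.toNat + 1)).map
            (fun j => PySem.Int.mod (e * a.getD j 0 + (if j = 0 then 0 else e * b.getD (j - 1) 0)) md)
          (na, nb))
        (a, b)
    PySem.Int.mod (ab.1.getD k.toNat 0 + ab.2.getD k.toNat 0) md

-- ===== PRECONDITION & SPEC =====
-- Pre_ keeps the natural domain k ≥ 0 (with n ≥ 0 when k = 0) plus the inputs n ≤ k < 0,
-- on which A returns 0 from an empty loop and B returns 0 too.  It excludes k < 0 with
-- k < n, where math.comb raises ValueError, and n < 0 with k = 0, where pow(o, n, mod)
-- either raises ValueError or returns a modular inverse (e.g. n = -1, m = 3, k = 0 gives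
-- 500000004), a value that is not a count of arrays.
def Pre_countOfArrays (n : Int) (m : Int) (k : Int) : Prop :=
  (0 ≤ k ∧ (0 ≤ n ∨ 0 < k)) ∨ (k < 0 ∧ n ≤ k)
instance (n : Int) (m : Int) (k : Int) : Decidable (Pre_countOfArrays n m k) := by
  unfold Pre_countOfArrays; infer_instance

def pvWitness_countOfArrays : Int × Int × Int := (4, 4, 1)

def Spec_countOfArrays (n : Int) (m : Int) (k : Int) (out : Int) : Prop :=
  out = countOfArrays_alt n m k
instance (n : Int) (m : Int) (k : Int) (out : Int) : Decidable (Spec_countOfArrays n m k out) := by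
  unfold Spec_countOfArrays; infer_instance

-- ===== CLAIM (what is proved, stated in full; the proofs are below) =====
def Claim_equal_countOfArrays : Prop :=
  ∀ (n : Int) (m : Int) (k : Int), Dom_countOfArrays n m k → Pre_countOfArrays n m k →
    Spec_countOfArrays n m k (countOfArrays n m k)


-- ===== LEMMAS AND PROOFS =====

-- Exact (unreduced) integer dynamic program mirroring B's recurrence:
-- (dpz e o nn j).1 = weight of length-nn words ending odd (or empty) with j even-even
-- adjacencies, (dpz e o nn j).2 = same ending even.
def dpz (e o : Int) : Nat → Nat → Int × Int
  | 0, j => (if j = 0 then 1 else 0, 0)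
  | nn + 1, j =>
      (o * ((dpz e o nn j).1 + (dpz e o nn j).2),
       e * (dpz e o nn j).1 +
         (match j with
          | 0 => 0
          | j' + 1 => e * (dpz e o nn j').2))

-- Closed-form terms corresponding to A's summands, split by last-element parity.
def faT (e o : Int) (nn j x : Nat) : Int :=
  if 1 ≤ x ∧ x + j ≤ nn then
    ((x + j - 1).choose (x - 1) : Int) * ((nn - x - j).choose x : Int)
      * e ^ (x + j) * o ^ (nn - x - j)
  else 0

def fbT (e o : Int) (nn j x : Nat) : Int :=
  if 1 ≤ x ∧ x + j ≤ nn then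
    ((x + j - 1).choose (x - 1) : Int) * ((nn - x - j).choose (x - 1) : Int)
      * e ^ (x + j) * o ^ (nn - x - j)
  else 0

def fa (e o : Int) (nn j : Nat) : Int :=
  (if j = 0 then o ^ nn else 0) + ∑ x ∈ Finset.range (nn + 1), faT e o nn j x

def fb (e o : Int) (nn j : Nat) : Int :=
  ∑ x ∈ Finset.range (nn + 1), fbT e o nn j x

-- A's exact summand (before modular reduction), in Nat indices.
def gterm (e o : Int) (N K x : Nat) : Int :=
  ((x + K - 1).choose (x - 1) : Int) * ((N + 1 - x - K).choose x : Int)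
    * e ^ (x + K) * o ^ (N - x - K)

lemma faT_zero_of_gt (e o : Int) (nn j x : Nat) (h : nn < x + j) : faT e o nn j x = 0 := by
  unfold faT
  rw [if_neg (by omega)]

lemma fbT_zero_of_gt (e o : Int) (nn j x : Nat) (h : nn < x + j) : fbT e o nn j x = 0 := by
  unfold fbT
  rw [if_neg (by omega)]

-- Pascal step for the "a" state.
lemma faT_succ (e o : Int) (nn j x : Nat) :
    faT e o (nn + 1) j x = o * faT e o nn j x + o * fbT e o nn j x := by
  unfold faT fbT
  by_cases h1 : 1 ≤ x ∧ x + j ≤ nn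
  · rw [if_pos (by omega), if_pos h1, if_pos h1]
    obtain ⟨x', rfl⟩ : ∃ x', x = x' + 1 := ⟨x - 1, by omega⟩
    have hM : nn + 1 - (x' + 1) - j = (nn - (x' + 1) - j) + 1 := by omega
    rw [hM, Nat.choose_succ_succ]
    simp only [Nat.add_sub_cancel]
    push_cast
    ring
  · by_cases h2 : 1 ≤ x ∧ x + j ≤ nn + 1
    · rw [if_pos h2, if_neg h1, if_neg h1]
      have hM : nn + 1 - x - j = 0 := by omega
      rw [hM, Nat.choose_eq_zero_of_lt (by omega : 0 < x)]
      push_cast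
      ring
    · rw [if_neg h2, if_neg h1, if_neg h1]
      ring

-- Pascal step for the "b" state, j = 0.
lemma fbT_succ_zero (e o : Int) (nn i : Nat) :
    fbT e o (nn + 1) 0 (i + 1) = e * faT e o nn 0 i + (if i = 0 then e * o ^ nn else 0) := by
  unfold faT fbT
  rcases Nat.eq_zero_or_pos i with hi | hi
  · subst hi
    rw [if_pos (by omega), if_neg (by omega), if_pos rfl]
    simp [pow_succ]
  · rw [if_neg (by omega : ¬ i = 0)]
    by_cases h1 : i ≤ nn
    · rw [if_pos (by omega), if_pos (by omega)]
      have h2 : nn + 1 - (i + 1) - 0 = nn - i - 0 := by omega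
      rw [h2]
      simp [Nat.choose_self]
      ring
    · rw [if_neg (by omega), if_neg (by omega)]
      ring

-- Pascal step for the "b" state, j = j' + 1.
lemma fbT_succ_succ (e o : Int) (nn j' i : Nat) :
    fbT e o (nn + 1) (j' + 1) (i + 1) =
      e * fbT e o nn j' (i + 1) + e * faT e o nn (j' + 1) i := by
  unfold faT fbT
  by_cases hc : i + 1 + j' ≤ nn
  · rw [if_pos (by omega), if_pos (by omega)]
    have ho : nn + 1 - (i + 1) - (j' + 1) = nn - (i + 1) - j' := by omega
    rcases Nat.eq_zero_or_pos i with hi | hi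
    · subst hi
      rw [if_neg (by omega)]
      rw [ho]
      have h1 : 0 + 1 + (j' + 1) - 1 = j' + 1 := by omega
      have h2 : 0 + 1 - 1 = 0 := by omega
      have h3 : 0 + 1 + j' - 1 = j' := by omega
      rw [h1, h2, h3]
      simp only [Nat.choose_zero_right, Nat.cast_one]
      ring
    · rw [if_pos (by omega)]
      obtain ⟨i', rfl⟩ : ∃ i', i = i' + 1 := ⟨i - 1, by omega⟩
      obtain ⟨M, hM⟩ : ∃ M, nn - (i' + 1 + 1) - j' = M := ⟨_, rfl⟩
      have hA : nn + 1 - (i' + 1 + 1) - (j' + 1) = M := by omega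
      have hB : nn - (i' + 1) - (j' + 1) = M := by omega
      have e1 : i' + 1 + 1 + (j' + 1) - 1 = i' + j' + 1 + 1 := by omega
      have e2 : i' + 1 + 1 - 1 = i' + 1 := by omega
      have e3 : i' + 1 + 1 + j' - 1 = i' + j' + 1 := by omega
      have e4 : i' + 1 + (j' + 1) - 1 = i' + j' + 1 := by omega
      have e5 : i' + 1 - 1 = i' := by omega
      rw [hM, hA, hB, e1, e2, e3, e4, e5, Nat.choose_succ_succ]
      push_cast
      ring
  · rw [if_neg (by omega), if_neg (by omega), if_neg (by omega)]
    ring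

lemma faT_x0 (e o : Int) (nn j : Nat) : faT e o nn j 0 = 0 := by
  unfold faT; rw [if_neg (by omega)]

lemma fbT_x0 (e o : Int) (nn j : Nat) : fbT e o nn j 0 = 0 := by
  unfold fbT; rw [if_neg (by omega)]

-- The closed forms satisfy B's recurrence.
lemma dp_closed (e o : Int) : ∀ nn j, fa e o nn j = (dpz e o nn j).1 ∧ fb e o nn j = (dpz e o nn j).2 := by
  intro nn
  induction nn with
  | zero =>
    intro j
    constructor
    · unfold fa dpz
      rw [Finset.sum_range_one, faT_x0]
      by_cases hj : j = 0 <;> simp [hj]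
    · unfold fb dpz
      rw [Finset.sum_range_one, fbT_x0]
  | succ nn ih =>
    intro j
    constructor
    · have ha : fa e o (nn + 1) j = o * (fa e o nn j + fb e o nn j) := by
        unfold fa fb
        rw [show nn + 1 + 1 = (nn + 1) + 1 from rfl,
          Finset.sum_congr rfl (fun x _ => faT_succ e o nn j x),
          Finset.sum_add_distrib, ← Finset.mul_sum, ← Finset.mul_sum,
          Finset.sum_range_succ (fun x => faT e o nn j x),
          Finset.sum_range_succ (fun x => fbT e o nn j x),
          faT_zero_of_gt e o nn j (nn + 1) (by omega),
          fbT_zero_of_gt e o nn j (nn + 1) (by omega), add_zero, add_zero]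
        by_cases hj : j = 0 <;> simp [hj, pow_succ] <;> ring
      rw [ha, (ih j).1, (ih j).2]
      simp [dpz]
    · cases j with
      | zero =>
        have hb : fb e o (nn + 1) 0 = e * fa e o nn 0 := by
          unfold fb fa
          rw [show nn + 1 + 1 = (nn + 1) + 1 from rfl, Finset.sum_range_succ',
            Finset.sum_congr rfl (fun i _ => fbT_succ_zero e o nn i),
            Finset.sum_add_distrib, fbT_x0, add_zero, ← Finset.mul_sum,
            Finset.sum_ite_eq' (Finset.range (nn + 1)) 0 (fun _ => e * o ^ nn)]
          rw [if_pos (Finset.mem_range.mpr (Nat.succ_pos nn)), if_pos rfl]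
          ring
        rw [hb, (ih 0).1]
        simp [dpz]
      | succ j' =>
        have hb : fb e o (nn + 1) (j' + 1) = e * fa e o nn (j' + 1) + e * fb e o nn j' := by
          unfold fb fa
          rw [show nn + 1 + 1 = (nn + 1) + 1 from rfl, Finset.sum_range_succ',
            Finset.sum_congr rfl (fun i _ => fbT_succ_succ e o nn j' i),
            Finset.sum_add_distrib, fbT_x0, add_zero, ← Finset.mul_sum, ← Finset.mul_sum]
          have h1 : ∑ x ∈ Finset.range (nn + 1 + 1), fbT e o nn j' x
              = ∑ i ∈ Finset.range (nn + 1), fbT e o nn j' (i + 1) := by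
            rw [Finset.sum_range_succ' (fun x => fbT e o nn j' x), fbT_x0, add_zero]
          rw [← h1, Finset.sum_range_succ (fun x => fbT e o nn j' x),
            fbT_zero_of_gt e o nn j' (nn + 1) (by omega), add_zero]
          rw [if_neg (by omega : ¬ j' + 1 = 0)]
          ring
        rw [hb, (ih (j' + 1)).1, (ih j').2]
        simp [dpz]

-- Alignment of A's sum range with the closed forms.
lemma align (e o : Int) (N K : Nat) (hKN : K ≤ N) :
    fa e o N K + fb e o N K =
      (if K = 0 then o ^ N else 0) +
        ∑ i ∈ Finset.range ((N + 1 - K) / 2), gterm e o N K (1 + i) := by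
  obtain ⟨S, hS⟩ : ∃ S, N + 1 - K = S := ⟨_, rfl⟩
  have hSK : S + K = N + 1 := by omega
  rw [hS]
  have hdm := Nat.div_add_mod S 2
  have hml : S % 2 < 2 := Nat.mod_lt _ (by norm_num)
  set Bn := S / 2 with hBn
  have hb1 : 2 * Bn ≤ S := by omega
  have hb2 : S < 2 * (Bn + 1) := by omega
  have hBN : Bn ≤ N := by omega
  have hT0 : ∀ x, Bn < x → faT e o N K x + fbT e o N K x = 0 := by
    intro x hx
    by_cases hxk : x + K ≤ N
    · unfold faT fbT
      rw [if_pos ⟨by omega, hxk⟩, if_pos ⟨by omega, hxk⟩]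
      have h1 : N - x - K < x - 1 := by omega
      rw [Nat.choose_eq_zero_of_lt (by omega : N - x - K < x),
        Nat.choose_eq_zero_of_lt h1]
      push_cast
      ring
    · rw [faT_zero_of_gt e o N K x (by omega), fbT_zero_of_gt e o N K x (by omega)]
      ring
  unfold fa fb
  rw [add_assoc, ← Finset.sum_add_distrib]
  congr 1
  have hsub : ∑ x ∈ Finset.range (Bn + 1), (faT e o N K x + fbT e o N K x)
      = ∑ x ∈ Finset.range (N + 1), (faT e o N K x + fbT e o N K x) := by
    refine Finset.sum_subset (fun y hy => ?_) (fun x _ hxs => hT0 x (by simpa using hxs))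
    simp only [Finset.mem_range] at hy ⊢
    omega
  rw [← hsub, Finset.sum_range_succ', faT_x0, fbT_x0]
  simp only [add_zero]
  refine Finset.sum_congr rfl ?_
  intro i hi
  have hi' : i < Bn := by simpa using hi
  have hik : i + 1 + K ≤ N := by omega
  unfold faT fbT gterm
  rw [if_pos ⟨by omega, hik⟩, if_pos ⟨by omega, hik⟩]
  have h1 : N + 1 - (1 + i) - K = (N - (i + 1) - K) + 1 := by omega
  have h2 : 1 + i + K - 1 = i + K := by omega
  have h3 : 1 + i - 1 = i := by omega
  have h4 : i + 1 + K - 1 = i + K := by omega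
  have h5 : i + 1 - 1 = i := by omega
  have h6 : N - (1 + i) - K = N - (i + 1) - K := by omega
  have h7 : 1 + i + K = i + 1 + K := by omega
  have h8 : 1 + i = i + 1 := by omega
  rw [h1, h2, h3, h4, h5, h6, h7, h8, Nat.choose_succ_succ]
  push_cast
  ring

lemma pv_emod (a p : Int) : a % p ≡ a [ZMOD p] := Int.emod_emod_of_dvd a dvd_rfl

-- B's loop invariant: after i iterations the two lists hold the mod-reduced dpz values.
lemma B_loop (e o : Int) (K : Nat) : ∀ i,
    (List.range i).foldl
      (fun (ab : List Int × List Int) (_ : Nat) =>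
        ((List.range (K + 1)).map
            (fun j => PySem.Int.mod (o * (ab.1.getD j 0 + ab.2.getD j 0)) (10 ^ 9 + 7)),
         (List.range (K + 1)).map
            (fun j => PySem.Int.mod
              (e * ab.1.getD j 0 + (if j = 0 then 0 else e * ab.2.getD (j - 1) 0)) (10 ^ 9 + 7))))
      ((List.replicate (K + 1) 0).set 0 1, List.replicate (K + 1) 0)
    = ((List.range (K + 1)).map (fun j => (dpz e o i j).1 % (10 ^ 9 + 7)),
       (List.range (K + 1)).map (fun j => (dpz e o i j).2 % (10 ^ 9 + 7))) := by
  intro i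
  induction i with
  | zero =>
    simp only [List.range_zero, List.foldl_nil]
    refine Prod.ext ?_ ?_
    · apply List.ext_getElem
      · simp
      · intro j h1 h2
        simp only [List.getElem_set, List.getElem_replicate, List.getElem_map,
          List.getElem_range, dpz]
        by_cases hj : j = 0 <;> simp [hj]
        omega
    · apply List.ext_getElem
      · simp
      · intro j h1 h2
        simp [dpz]
  | succ i ih =>
    have hr : List.range (i + 1) = List.range i ++ [i] := List.range_succ
    rw [hr, List.foldl_append, ih, List.foldl_cons, List.foldl_nil]
    have hmp : (0 : Int) < 10 ^ 9 + 7 := by norm_num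
    refine Prod.ext ?_ ?_
    · apply List.map_congr_left
      intro j hj
      have hjK : j < K + 1 := List.mem_range.mp hj
      rw [PySem.List.getD_map_range _ _ _ _ hjK, PySem.List.getD_map_range _ _ _ _ hjK,
        PySem.Int.mod_eq_emod_of_pos hmp]
      have hd : (dpz e o (i + 1) j).1 = o * ((dpz e o i j).1 + (dpz e o i j).2) := by
        simp [dpz]
      rw [hd]
      exact ((pv_emod _ _).add (pv_emod _ _)).mul_left o
    · apply List.map_congr_left
      intro j hj
      have hjK : j < K + 1 := List.mem_range.mp hj
      rw [PySem.List.getD_map_range _ _ _ _ hjK, PySem.Int.mod_eq_emod_of_pos hmp]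
      cases j with
      | zero =>
        have hd : (dpz e o (i + 1) 0).2 = e * (dpz e o i 0).1 + 0 := by simp [dpz]
        rw [hd, if_pos rfl]
        exact ((pv_emod _ _).mul_left e).add_right 0
      | succ j' =>
        rw [if_neg (by omega : ¬ j' + 1 = 0)]
        have hj' : j' + 1 - 1 < K + 1 := by omega
        rw [PySem.List.getD_map_range _ _ _ _ hj']
        have hd : (dpz e o (i + 1) (j' + 1)).2
            = e * (dpz e o i (j' + 1)).1 + e * (dpz e o i (j' + 1 - 1)).2 := by
          simp [dpz]
        rw [hd]
        exact ((pv_emod _ _).mul_left e).add ((pv_emod _ _).mul_left e)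

lemma B_main (m : Int) (N K : Nat) (hKN : K ≤ N) :
    countOfArrays_alt (N : Int) m (K : Int) =
      ((dpz (PySem.Int.floordiv m 2) (PySem.Int.floordiv (m + 1) 2) N K).1 +
        (dpz (PySem.Int.floordiv m 2) (PySem.Int.floordiv (m + 1) 2) N K).2) % (10 ^ 9 + 7) := by
  have hmp : (0 : Int) < 10 ^ 9 + 7 := by norm_num
  simp only [countOfArrays_alt]
  rw [if_neg (by omega : ¬ ((K : Int) < 0 ∨ (N : Int) < (K : Int)))]
  simp only [Int.toNat_natCast]
  rw [B_loop (PySem.Int.floordiv m 2) (PySem.Int.floordiv (m + 1) 2) K N]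
  rw [PySem.List.getD_map_range _ _ _ _ (Nat.lt_succ_self K),
    PySem.List.getD_map_range _ _ _ _ (Nat.lt_succ_self K),
    PySem.Int.mod_eq_emod_of_pos hmp]
  exact (pv_emod _ _).add (pv_emod _ _)

lemma foldl_add_sum_range (t : Int → Int) (n : Nat) (a : Int) :
    ((List.range n).map (fun k : Nat => (1 : Int) + (k : Int))).foldl (fun res x => res + t x) a
      = a + ∑ i ∈ Finset.range n, t (1 + (i : Int)) := by
  rw [List.foldl_map, PySem.List.foldl_add]
  rfl

lemma A_main (m : Int) (N K : Nat) (hKN : K ≤ N) :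
    countOfArrays (N : Int) m (K : Int) =
      (fa (PySem.Int.floordiv m 2) (PySem.Int.floordiv (m + 1) 2) N K +
        fb (PySem.Int.floordiv m 2) (PySem.Int.floordiv (m + 1) 2) N K) % (10 ^ 9 + 7) := by
  have hmp : (0 : Int) < 10 ^ 9 + 7 := by norm_num
  set e := PySem.Int.floordiv m 2 with he
  set o := PySem.Int.floordiv (m + 1) 2 with ho
  obtain ⟨S, hS⟩ : ∃ S, N + 1 - K = S := ⟨_, rfl⟩
  have hSK : S + K = N + 1 := by omega
  have hdm := Nat.div_add_mod S 2
  have hml : S % 2 < 2 := Nat.mod_lt _ (by norm_num)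
  simp only [countOfArrays]
  have hcast : ((N : Int) + 1 - (K : Int)) = ((S : Nat) : Int) := by omega
  have hfd : PySem.Int.floordiv ((N : Int) + 1 - (K : Int)) 2 = ((S / 2 : Nat) : Int) := by
    rw [hcast]
    exact_mod_cast PySem.Int.floordiv_natCast S 2
  rw [hfd, PySem.List.pyRange_one]
  have hlen : (((S / 2 : Nat) : Int) + 1 - 1).toNat = S / 2 := by omega
  rw [hlen, foldl_add_sum_range, zero_add]
  simp only [Int.toNat_natCast, Nat.cast_eq_zero]
  rw [PySem.Int.mod_eq_emod_of_pos hmp]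
  rw [align e o N K hKN, hS]
  refine Int.ModEq.add ?_ ?_
  · by_cases hK : K = 0
    · simp only [hK, if_pos]
      rw [PySem.Int.powMod_eq_emod _ _ hmp]
      exact pv_emod _ _
    · simp only [if_neg hK]
      exact Int.ModEq.refl 0
  · refine Int.ModEq.sum ?_
    intro i hi
    have hi' : i < S / 2 := Finset.mem_range.mp hi
    have hik : i + 1 + K ≤ N := by omega
    have h1 : ((1 : Int) + (i : Int) + (K : Int) - 1).toNat = i + K := by omega
    have h2 : ((1 : Int) + (i : Int) - 1).toNat = i := by omega
    have h3 : ((N : Int) - (1 + (i : Int)) - (K : Int) + 1).toNat = N + 1 - (1 + i) - K := by omega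
    have h4 : ((1 : Int) + (i : Int)).toNat = 1 + i := by omega
    have h5 : ((1 : Int) + (i : Int) + (K : Int)).toNat = 1 + i + K := by omega
    have h6 : ((N : Int) - (1 + (i : Int)) - (K : Int)).toNat = N - (1 + i) - K := by omega
    rw [PySem.Int.mod_eq_emod_of_pos hmp, h1, h2, h3, h4, h5, h6,
      PySem.Int.powMod_eq_emod _ _ hmp, PySem.Int.powMod_eq_emod _ _ hmp]
    unfold gterm
    have h7 : 1 + i + K - 1 = i + K := by omega
    have h8 : 1 + i - 1 = i := by omega
    rw [h7, h8]
    exact (pv_emod _ _).trans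
      (((Int.ModEq.refl (((i + K).choose i : Int) * ((N + 1 - (1 + i) - K).choose (1 + i) : Int))).mul
          (pv_emod _ _)).mul (pv_emod _ _))

-- ===== VERDICT (by name: the statement is the Claim_ definition above) =====
theorem countOfArrays_spec : Claim_equal_countOfArrays := by
  intro n m k _ hpre
  unfold Spec_countOfArrays
  unfold Pre_countOfArrays at hpre
  by_cases hk : 0 ≤ k ∧ k ≤ n
  · obtain ⟨K, rfl⟩ : ∃ K : Nat, k = (K : Int) := ⟨k.toNat, (Int.toNat_of_nonneg hk.1).symm⟩
    obtain ⟨N, rfl⟩ : ∃ N : Nat, n = (N : Int) :=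
      ⟨n.toNat, (Int.toNat_of_nonneg (le_trans hk.1 hk.2)).symm⟩
    have hKN : K ≤ N := by exact_mod_cast hk.2
    rw [A_main m N K hKN, B_main m N K hKN,
      (dp_closed (PySem.Int.floordiv m 2) (PySem.Int.floordiv (m + 1) 2) N K).1,
      (dp_closed (PySem.Int.floordiv m 2) (PySem.Int.floordiv (m + 1) 2) N K).2]
  · have hmp : (0 : Int) < 10 ^ 9 + 7 := by norm_num
    have hcases : (k < 0 ∧ n ≤ k) ∨ (0 < k ∧ n < k) := by omega
    have hA : countOfArrays n m k = 0 := by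
      simp only [countOfArrays]
      rw [if_neg (by omega : ¬ k = 0)]
      have hnil : PySem.List.pyRange 1 (PySem.Int.floordiv (n + 1 - k) 2 + 1) 1 = [] := by
        apply PySem.List.pyRange_one_eq_nil
        rw [PySem.Int.floordiv_eq_ediv_of_pos (by norm_num : (0:Int) < 2)]
        omega
      rw [hnil, List.foldl_nil, PySem.Int.mod_eq_emod_of_pos hmp]
      simp
    have hB : countOfArrays_alt n m k = 0 := by
      simp only [countOfArrays_alt]
      rw [if_pos (by omega : k < 0 ∨ n < k)]
    rw [hA, hB]
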